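-- pv_equiv track=rewrite | github.com/MaXuMeRum/AOIS | lr1/main.py | divide_binary_code
-- ===== SOURCE A (Python) =====
-- def divide_binary_code(dividend: str, divisor: str, bits=16) -> tuple:
--     """Деление двух двоичных чисел."""
--     # Определение знака результата
--     sign_quotient = '1' if dividend[0] != divisor[0] else '0'  # Знак '-' если знаки разные, иначе '+'
--     sign_remainder = dividend[0]  # Остаток имеет тот же знак, что и делимое
--
--     # Работа с модулями чисел
--     dividend_magnitude = dividend[1:]
--     divisor_magnitude = divisor[1:]
--
--     # Переводим модули в десятичные числа вручную
--     def binary_to_dec(binary: str) -> int: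
--         decimal = 0
--         power = 1
--         for bit in reversed(binary):
--             if bit == '1':
--                 decimal += power
--             power *= 2
--         return decimal
--
--     dividend_dec = binary_to_dec(dividend_magnitude)
--     divisor_dec = binary_to_dec(divisor_magnitude)
--
--     # Проверка деления на ноль
--     if divisor_dec == 0:
--         return "Ошибка: деление на ноль", ""
--
--     # Выполняем деление
--     quotient_dec = dividend_dec // divisor_dec
--     remainder_dec = dividend_dec % divisor_dec
--
--     # Переводим результат обратно в двоичный формат вручную
--     def dec_to_binary(decimal: int, bits: int) -> str:
--         binary = ''
--         for _ in range(bits):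
--             binary = str(decimal % 2) + binary
--             decimal = decimal // 2
--         return binary
--
--     quotient_binary = dec_to_binary(abs(quotient_dec), bits - 1)  # Оставляем место для знакового бита
--     remainder_binary = dec_to_binary(abs(remainder_dec), bits - 1)
--
--     # Добавляем знаковые биты
--     quotient_binary = sign_quotient + quotient_binary
--     remainder_binary = sign_remainder + remainder_binary
--
--     # Возвращаем частное и остаток
--     return quotient_binary, remainder_binary
-- ===== SOURCE B (Python) =====
-- def divide_binary_code(dividend: str, divisor: str, bits=16) -> tuple:
--     """Binary long division over the magnitude strings: one left-to-right
--     shift-and-subtract pass builds the quotient bits directly (no // or %)."""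
--     sign_quotient = '1' if dividend[0] != divisor[0] else '0'
--     sign_remainder = dividend[0]
--
--     d = 0
--     for c in divisor[1:]:
--         d = d * 2 + (1 if c == '1' else 0)
--     if d == 0:
--         return "Ошибка: деление на ноль", ""
--
--     rem = 0
--     qbits = []
--     for c in dividend[1:]:
--         rem = rem * 2 + (1 if c == '1' else 0)
--         if rem >= d:
--             rem -= d
--             qbits.append('1')
--         else:
--             qbits.append('0')
--
--     def _to_bits(n: int) -> str:
--         # minimal binary representation of n >= 0 ('0' for 0)
--         if n < 2:
--             return str(n)
--         return _to_bits(n // 2) + str(n % 2)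
--
--     def _window(s: str, w: int) -> str:
--         # low w bits of the binary string s, zero-padded on the left to width w
--         if w <= 0:
--             return ''
--         if len(s) >= w:
--             return s[len(s) - w:]
--         return '0' * (w - len(s)) + s
--
--     quotient_binary = sign_quotient + _window(''.join(qbits), bits - 1)
--     remainder_binary = sign_remainder + _window(_to_bits(rem), bits - 1)
--     return quotient_binary, remainder_binary
-- ===== Notes on version B (the rewrite author's own statement) =====
-- stated objective: faster
-- what changed: Replaces binary-to-decimal conversion followed by big-int // and % and a fixed bits-long string-prepending reconversion loop with a single left-to-right shift-and-subtract long-division pass that builds the quotient bits directly.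
import Mathlib
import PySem

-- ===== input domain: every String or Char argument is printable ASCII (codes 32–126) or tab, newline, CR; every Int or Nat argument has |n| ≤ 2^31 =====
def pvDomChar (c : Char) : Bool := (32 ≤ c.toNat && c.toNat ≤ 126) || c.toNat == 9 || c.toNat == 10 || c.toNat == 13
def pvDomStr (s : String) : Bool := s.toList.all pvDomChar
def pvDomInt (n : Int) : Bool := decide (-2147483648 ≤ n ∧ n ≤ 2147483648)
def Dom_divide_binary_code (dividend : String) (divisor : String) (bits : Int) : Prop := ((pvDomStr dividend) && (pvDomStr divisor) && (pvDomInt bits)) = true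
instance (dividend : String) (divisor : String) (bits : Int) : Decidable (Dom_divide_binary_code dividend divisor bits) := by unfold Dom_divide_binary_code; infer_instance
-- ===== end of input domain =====

-- B replaces decimal conversion + // and % + a quadratic string-prepending reconversion loop
-- with one left-to-right shift-and-subtract long-division pass (measured faster in a timing run).

-- ===== PORT A =====
-- binary_to_dec: reversed-order fold carrying (decimal, power)
def pvB2D (l : List Char) : Int :=
  (l.reverse.foldl (fun (st : Int × Int) bit =>
    (if bit = '1' then st.1 + st.2 else st.1, st.2 * 2)) (0, 1)).1

-- dec_to_binary: 'for _ in range(bits)' prepending str(decimal % 2); fuel = (bits).toNat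
-- (Python's range is empty for bits ≤ 0, which .toNat matches)
def pvD2B (decimal : Int) : Nat → List Char
  | 0 => []
  | n + 1 => pvD2B (PySem.Int.floordiv decimal 2) n ++ PySem.Int.toChars (PySem.Int.mod decimal 2)

def divide_binary_code (dividend : String) (divisor : String) (bits : Int) : String × String :=
  -- dividend[0]/divisor[0] raise IndexError on empty strings (excluded by Pre_); the
  -- match exposes the first char and the [1:] magnitude slice at once.
  match dividend.toList, divisor.toList with
  | d0 :: dm, v0 :: vm =>
    let sign_quotient : Char := if d0 ≠ v0 then '1' else '0'
    let sign_remainder : Char := d0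
    let dividend_dec := pvB2D dm
    let divisor_dec := pvB2D vm
    if divisor_dec = 0 then ("Ошибка: деление на ноль", "")
    else
      let quotient_dec := PySem.Int.floordiv dividend_dec divisor_dec
      let remainder_dec := PySem.Int.mod dividend_dec divisor_dec
      (String.ofList (sign_quotient :: pvD2B |quotient_dec| (bits - 1).toNat),
       String.ofList (sign_remainder :: pvD2B |remainder_dec| (bits - 1).toNat))
  | _, _ => ("", "")   -- unreachable under Pre_ (Python raises IndexError)

-- ===== PORT B =====
-- running value of the divisor magnitude: d = d*2 + bit, left to right
def pvVal (l : List Char) : Int :=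
  l.foldl (fun a c => a * 2 + (if c = '1' then 1 else 0)) 0

-- one long-division step: shift the next bit into the remainder, subtract if it fits
def pvStep (d : Int) (st : Int × List Char) (c : Char) : Int × List Char :=
  let rem := st.1 * 2 + (if c = '1' then 1 else 0)
  if rem ≥ d then (rem - d, st.2 ++ ['1']) else (rem, st.2 ++ ['0'])

-- _to_bits: minimal binary representation (argument is the final remainder, ≥ 0)
def pvToBits : Nat → List Char
  | 0 => ['0']
  | 1 => ['1']
  | n + 2 => pvToBits ((n + 2) / 2) ++ (if (n + 2) % 2 = 1 then ['1'] else ['0'])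
decreasing_by omega

-- _window: low w bits of s, zero-padded on the left to width w
def pvWindow (s : List Char) (w : Int) : List Char :=
  if w ≤ 0 then []
  else if (s.length : Int) ≥ w then s.drop (s.length - w.toNat)
  else List.replicate (w.toNat - s.length) '0' ++ s

def divide_binary_code_alt (dividend : String) (divisor : String) (bits : Int) : String × String :=
  match dividend.toList with
  | [] => ("", "")   -- unreachable under Pre_ (Python raises IndexError)
  | d0 :: dm =>
    match divisor.toList with
    | [] => ("", "")   -- unreachable under Pre_ (Python raises IndexError)
    | v0 :: vm =>
      let sign_quotient : Char := if d0 ≠ v0 then '1' else '0'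
      let d := pvVal vm
      if d = 0 then ("Ошибка: деление на ноль", "")
      else
        let st := dm.foldl (pvStep d) (0, [])
        (String.ofList (sign_quotient :: pvWindow st.2 (bits - 1)),
         String.ofList (d0 :: pvWindow (pvToBits st.1.toNat) (bits - 1)))

-- ===== PRECONDITION & SPEC =====
-- Pre_ excludes exactly the inputs where A raises: dividend[0]/divisor[0] is an
-- IndexError on an empty string (B raises there too).
def Pre_divide_binary_code (dividend : String) (divisor : String) (bits : Int) : Prop :=
  dividend ≠ "" ∧ divisor ≠ ""
instance (dividend : String) (divisor : String) (bits : Int) : Decidable (Pre_divide_binary_code dividend divisor bits) := by unfold Pre_divide_binary_code; infer_instance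

def pvWitness_divide_binary_code : String × String × Int := ("01101", "0011", 8)

def Spec_divide_binary_code (dividend : String) (divisor : String) (bits : Int) (out : String × String) : Prop := out = divide_binary_code_alt dividend divisor bits
instance (dividend : String) (divisor : String) (bits : Int) (out : String × String) : Decidable (Spec_divide_binary_code dividend divisor bits out) := by unfold Spec_divide_binary_code; infer_instance

-- ===== CLAIM (what is proved, stated in full; the proofs are below) =====
def Claim_equal_divide_binary_code : Prop := ∀ (dividend : String) (divisor : String) (bits : Int), Dom_divide_binary_code dividend divisor bits → Pre_divide_binary_code dividend divisor bits → Spec_divide_binary_code dividend divisor bits (divide_binary_code dividend divisor bits)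

-- ===== LEMMAS AND PROOFS =====

-- bit value of a character
def pvBit (c : Char) : Nat := if c = '1' then 1 else 0

-- big-endian (most significant first) value of a bit string
def pvNV (l : List Char) : Nat := l.foldl (fun a c => 2 * a + pvBit c) 0

-- little-endian value (what A's reversed loop accumulates)
def pvLV : List Char → Nat
  | [] => 0
  | c :: t => pvBit c + 2 * pvLV t

-- Nat version of A's dec_to_binary
def pvD2BN (m : Nat) : Nat → List Char
  | 0 => []
  | n + 1 => pvD2BN (m / 2) n ++ [if m % 2 = 1 then '1' else '0']

-- Nat version of B's window
def pvWinN (s : List Char) (n : Nat) : List Char :=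
  if n ≤ s.length then s.drop (s.length - n) else List.replicate (n - s.length) '0' ++ s

def pvBinStr (s : List Char) : Prop := ∀ c ∈ s, c = '0' ∨ c = '1'

theorem pvBit_le_one (c : Char) : pvBit c ≤ 1 := by
  unfold pvBit; split <;> omega

theorem pvNV_acc (l : List Char) : ∀ a : Nat,
    l.foldl (fun a c => 2 * a + pvBit c) a = a * 2 ^ l.length + pvNV l := by
  induction l with
  | nil => intro a; simp [pvNV]
  | cons c t ih =>
    intro a
    show t.foldl _ (2 * a + pvBit c) = _
    rw [ih]
    have h0 : pvNV (c :: t) = t.foldl (fun a c => 2 * a + pvBit c) (2 * 0 + pvBit c) := rfl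
    rw [ih] at h0
    simp only [List.length_cons, h0]
    ring

theorem pvNV_cons (c : Char) (t : List Char) :
    pvNV (c :: t) = pvBit c * 2 ^ t.length + pvNV t := by
  have h0 : pvNV (c :: t) = t.foldl (fun a c => 2 * a + pvBit c) (2 * 0 + pvBit c) := rfl
  rw [pvNV_acc] at h0
  simpa using h0

theorem pvNV_append_singleton (l : List Char) (c : Char) :
    pvNV (l ++ [c]) = 2 * pvNV l + pvBit c := by
  unfold pvNV
  rw [List.foldl_append]
  rfl

theorem pvLV_append_singleton (m : List Char) (c : Char) :
    pvLV (m ++ [c]) = pvLV m + pvBit c * 2 ^ m.length := by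
  induction m with
  | nil => simp [pvLV]
  | cons d t ih => simp [pvLV, ih]; ring

theorem pvNV_eq_pvLV_reverse (l : List Char) : pvNV l = pvLV l.reverse := by
  induction l with
  | nil => rfl
  | cons c t ih =>
    rw [pvNV_cons, List.reverse_cons, pvLV_append_singleton, ih, List.length_reverse]
    omega

theorem pvB2D_fold (m : List Char) : ∀ dec pow : Int,
    (m.foldl (fun (st : Int × Int) bit =>
      (if bit = '1' then st.1 + st.2 else st.1, st.2 * 2)) (dec, pow)).1
    = dec + pow * (pvLV m : Int) := by
  induction m with
  | nil => intro dec pow; simp [pvLV]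
  | cons c t ih =>
    intro dec pow
    show (t.foldl _ (if c = '1' then dec + pow else dec, pow * 2)).1 = _
    rw [ih]
    simp only [pvLV, pvBit]
    split <;> push_cast <;> ring

theorem pvB2D_eq (l : List Char) : pvB2D l = (pvNV l : Int) := by
  unfold pvB2D
  rw [pvB2D_fold, pvNV_eq_pvLV_reverse]
  ring

theorem pvVal_fold (l : List Char) : ∀ a : Nat,
    l.foldl (fun (a : Int) c => a * 2 + (if c = '1' then 1 else 0)) (a : Int)
    = ((l.foldl (fun a c => 2 * a + pvBit c) a : Nat) : Int) := by
  induction l with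
  | nil => intro a; rfl
  | cons c t ih =>
    intro a
    show t.foldl _ ((a : Int) * 2 + _) = _
    have h1 : (a : Int) * 2 + (if c = '1' then 1 else 0) = ((2 * a + pvBit c : Nat) : Int) := by
      simp only [pvBit]; split <;> push_cast <;> ring
    rw [h1, ih]
    rfl

theorem pvVal_eq (l : List Char) : pvVal l = (pvNV l : Int) := by
  have h := pvVal_fold l 0
  simpa [pvVal, pvNV] using h

theorem pvD2B_natCast (n : Nat) : ∀ m : Nat, pvD2B (m : Int) n = pvD2BN m n := by
  induction n with
  | zero => intro m; rfl
  | succ n ih =>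
    intro m
    show pvD2B (PySem.Int.floordiv (m : Int) 2) n ++ PySem.Int.toChars (PySem.Int.mod (m : Int) 2)
      = pvD2BN (m / 2) n ++ [if m % 2 = 1 then '1' else '0']
    have hd : PySem.Int.floordiv (m : Int) 2 = ((m / 2 : Nat) : Int) := by
      exact_mod_cast PySem.Int.floordiv_natCast m 2
    have hm : PySem.Int.mod (m : Int) 2 = ((m % 2 : Nat) : Int) := by
      exact_mod_cast PySem.Int.mod_natCast m 2
    rw [hd, hm, ih]
    rcases Nat.mod_two_eq_zero_or_one m with h | h <;> rw [h] <;> simp <;> decide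

theorem pvWindow_eq_pvWinN (s : List Char) (w : Int) : pvWindow s w = pvWinN s w.toNat := by
  unfold pvWindow pvWinN
  by_cases h1 : w ≤ 0
  · rw [if_pos h1, if_pos (show w.toNat ≤ s.length by omega)]
    rw [show s.length - w.toNat = s.length by omega, List.drop_length]
  · rw [if_neg h1]
    by_cases h2 : (s.length : Int) ≥ w
    · rw [if_pos h2, if_pos (by omega)]
    · rw [if_neg h2, if_neg (by omega)]

theorem pvD2BN_zero (n : Nat) : pvD2BN 0 n = List.replicate n '0' := by
  induction n with
  | zero => rfl
  | succ n ih =>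
    show pvD2BN (0 / 2) n ++ [if 0 % 2 = 1 then '1' else '0'] = _
    rw [Nat.zero_div, ih]
    simp [List.replicate_succ']

theorem pvWinN_nil (n : Nat) : pvWinN [] n = List.replicate n '0' := by
  unfold pvWinN
  cases n <;> simp

theorem pvWinN_concat (t : List Char) (c : Char) (n : Nat) :
    pvWinN (t ++ [c]) (n + 1) = pvWinN t n ++ [c] := by
  unfold pvWinN
  by_cases h : n ≤ t.length
  · rw [if_pos (by simp; omega), if_pos h]
    have h2 : t.length + 1 - (n + 1) = t.length - n := by omega
    simp only [List.length_append, List.length_cons, List.length_nil]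
    rw [show t.length + (0 + 1) - (n + 1) = t.length - n by omega]
    rw [List.drop_append_of_le_length (by omega)]
  · rw [if_neg (by simp; omega), if_neg h]
    simp only [List.length_append, List.length_cons, List.length_nil]
    rw [show n + 1 - (t.length + (0 + 1)) = n - t.length by omega]
    rw [List.append_assoc]

theorem pvWinN_eq_pvD2BN (n : Nat) : ∀ s : List Char, pvBinStr s →
    pvWinN s n = pvD2BN (pvNV s) n := by
  induction n with
  | zero =>
    intro s _
    unfold pvWinN pvD2BN
    rw [if_pos (by omega)]
    simp
  | succ n ih =>
    intro s hs
    obtain rfl | ⟨t, c, rfl⟩ := s.eq_nil_or_concat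
    · rw [show pvNV ([] : List Char) = 0 from rfl, pvD2BN_zero, pvWinN_nil]
    · simp only [List.concat_eq_append] at hs ⊢
      have hb : pvBinStr t := fun x hx => hs x (by simp [hx])
      have hc : c = '0' ∨ c = '1' := hs c (by simp)
      rw [pvNV_append_singleton]
      show pvWinN (t ++ [c]) (n + 1)
        = pvD2BN ((2 * pvNV t + pvBit c) / 2) n ++ [if (2 * pvNV t + pvBit c) % 2 = 1 then '1' else '0']
      have hble := pvBit_le_one c
      have hdiv : (2 * pvNV t + pvBit c) / 2 = pvNV t := by omega
      have hmod : (2 * pvNV t + pvBit c) % 2 = pvBit c := by omega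
      rw [hdiv, hmod, ← ih t hb, pvWinN_concat]
      congr 1
      rcases hc with rfl | rfl <;> simp [pvBit]

theorem pvToBits_spec (m : Nat) : pvNV (pvToBits m) = m ∧ pvBinStr (pvToBits m) := by
  induction m using pvToBits.induct with
  | case1 =>
    have hu : pvToBits 0 = ['0'] := by rw [pvToBits]
    refine ⟨by rw [hu]; decide, ?_⟩
    intro c hc; rw [hu] at hc; simp at hc; simp [hc]
  | case2 =>
    have hu : pvToBits 1 = ['1'] := by rw [pvToBits]
    refine ⟨by rw [hu]; decide, ?_⟩
    intro c hc; rw [hu] at hc; simp at hc; simp [hc]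
  | case3 n ih =>
    have hu : pvToBits (n + 2) = pvToBits ((n + 2) / 2) ++ (if (n + 2) % 2 = 1 then ['1'] else ['0']) := by
      rw [pvToBits]
    constructor
    · rw [hu]
      rcases Nat.mod_two_eq_zero_or_one (n + 2) with h | h
      · rw [h, if_neg (by decide), pvNV_append_singleton, ih.1]
        have hb : pvBit '0' = 0 := rfl
        omega
      · rw [h, if_pos rfl, pvNV_append_singleton, ih.1]
        have hb : pvBit '1' = 1 := rfl
        omega
    · intro c hc
      rw [hu] at hc
      rcases List.mem_append.1 hc with hmem | hmem
      · exact ih.2 c hmem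
      · rcases Nat.mod_two_eq_zero_or_one (n + 2) with h | h <;> rw [h] at hmem <;>
          simp at hmem <;> simp [hmem]

-- long-division invariant
theorem pvLD (D : Nat) (hD : 0 < D) (l : List Char) : ∀ (r : Nat) (q : List Char),
    r < D → pvBinStr q →
    ∃ (r' : Nat) (q' : List Char),
      l.foldl (pvStep (D : Int)) ((r : Int), q) = ((r' : Int), q') ∧ r' < D ∧ pvBinStr q' ∧
      pvNV q' * D + r' = (pvNV q * D + r) * 2 ^ l.length + pvNV l := by
  induction l with
  | nil =>
    intro r q hr hq
    exact ⟨r, q, rfl, hr, hq, by simp [pvNV]⟩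
  | cons c t ih =>
    intro r q hr hq
    have hble := pvBit_le_one c
    have hrem : (r : Int) * 2 + (if c = '1' then 1 else 0) = ((2 * r + pvBit c : Nat) : Int) := by
      simp only [pvBit]; split <;> push_cast <;> ring
    show ∃ r' q', t.foldl (pvStep (D : Int)) (pvStep (D : Int) ((r : Int), q) c) = _ ∧ _
    unfold pvStep
    simp only [hrem]
    by_cases hge : ((2 * r + pvBit c : Nat) : Int) ≥ (D : Int)
    · rw [if_pos hge]
      have hDle : D ≤ 2 * r + pvBit c := by exact_mod_cast hge
      have hsub : ((2 * r + pvBit c : Nat) : Int) - (D : Int) = ((2 * r + pvBit c - D : Nat) : Int) := by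
        push_cast [hDle]; ring
      rw [hsub]
      obtain ⟨r', q', heq, hr', hq', hval⟩ :=
        ih (2 * r + pvBit c - D) (q ++ ['1']) (by omega)
          (by intro x hx; rcases List.mem_append.1 hx with h | h
              · exact hq x h
              · simp at h; simp [h])
      refine ⟨r', q', heq, hr', hq', ?_⟩
      rw [hval, pvNV_append_singleton, pvNV_cons]
      have hb1 : pvBit '1' = 1 := rfl
      rw [hb1]
      have e1 : (2 * pvNV q + 1) * (D : Nat) + (2 * r + pvBit c - D)
          = (pvNV q * D + r) * 2 + pvBit c := by zify [hDle]; ring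
      rw [e1, List.length_cons]
      ring
    · rw [if_neg hge]
      have hlt : 2 * r + pvBit c < D := by
        have := lt_of_not_ge hge
        exact_mod_cast this
      obtain ⟨r', q', heq, hr', hq', hval⟩ :=
        ih (2 * r + pvBit c) (q ++ ['0']) hlt
          (by intro x hx; rcases List.mem_append.1 hx with h | h
              · exact hq x h
              · simp at h; simp [h])
      refine ⟨r', q', heq, hr', hq', ?_⟩
      rw [hval, pvNV_append_singleton, pvNV_cons]
      have hb0 : pvBit '0' = 0 := rfl
      rw [hb0, List.length_cons]
      ring


theorem pvDivMod_unique (D a q r : Nat) (hD : 0 < D) (h : q * D + r = a) (hr : r < D) :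
    q = a / D ∧ r = a % D := by
  subst h
  constructor
  · rw [show q * D + r = r + D * q by ring, Nat.add_mul_div_left _ _ hD, Nat.div_eq_of_lt hr]
    omega
  · rw [show q * D + r = r + q * D by ring, Nat.add_mul_mod_self_right, Nat.mod_eq_of_lt hr]

-- ===== VERDICT (by name: the statement is the Claim_ definition above) =====
theorem divide_binary_code_spec : Claim_equal_divide_binary_code := by
  intro dividend divisor bits _ hpre
  obtain ⟨h1, h2⟩ := hpre
  unfold Spec_divide_binary_code divide_binary_code divide_binary_code_alt
  rcases hd : dividend.toList with _ | ⟨d0, dm⟩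
  · exact absurd (String.toList_eq_nil_iff.mp hd) h1
  rcases hv : divisor.toList with _ | ⟨v0, vm⟩
  · exact absurd (String.toList_eq_nil_iff.mp hv) h2
  simp only [pvB2D_eq, pvVal_eq]
  by_cases h0 : pvNV vm = 0
  · have hz : ((pvNV vm : Nat) : Int) = 0 := by exact_mod_cast h0
    rw [if_pos hz, if_pos hz]
  · have hz : ((pvNV vm : Nat) : Int) ≠ 0 := by exact_mod_cast h0
    have hD : 0 < pvNV vm := Nat.pos_of_ne_zero h0
    rw [if_neg hz, if_neg hz]
    obtain ⟨r', q', heq, hr', hq', hval⟩ :=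
      pvLD (pvNV vm) hD dm 0 [] hD (by intro c hc; simp at hc)
    have hnil : pvNV ([] : List Char) = 0 := rfl
    have hval' : pvNV q' * pvNV vm + r' = pvNV dm := by simpa [hnil] using hval
    obtain ⟨hqv, hrv⟩ := pvDivMod_unique (pvNV vm) (pvNV dm) (pvNV q') r' hD hval' hr'
    have heq' : List.foldl (pvStep ((pvNV vm : Nat) : Int)) ((0 : Int), ([] : List Char)) dm
        = (((r' : Nat) : Int), q') := by exact_mod_cast heq
    rw [heq']
    have hfq : PySem.Int.floordiv ((pvNV dm : Nat) : Int) ((pvNV vm : Nat) : Int)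
        = ((pvNV dm / pvNV vm : Nat) : Int) := by
      exact_mod_cast PySem.Int.floordiv_natCast (pvNV dm) (pvNV vm)
    have hfm : PySem.Int.mod ((pvNV dm : Nat) : Int) ((pvNV vm : Nat) : Int)
        = ((pvNV dm % pvNV vm : Nat) : Int) := by
      exact_mod_cast PySem.Int.mod_natCast (pvNV dm) (pvNV vm)
    rw [hfq, hfm]
    have habs1 : |((pvNV dm / pvNV vm : Nat) : Int)| = ((pvNV dm / pvNV vm : Nat) : Int) :=
      abs_of_nonneg (by positivity)
    have habs2 : |((pvNV dm % pvNV vm : Nat) : Int)| = ((pvNV dm % pvNV vm : Nat) : Int) :=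
      abs_of_nonneg (by positivity)
    rw [habs1, habs2, pvD2B_natCast, pvD2B_natCast]
    have hwq : pvWindow q' (bits - 1) = pvD2BN (pvNV dm / pvNV vm) (bits - 1).toNat := by
      rw [pvWindow_eq_pvWinN, pvWinN_eq_pvD2BN _ q' hq', hqv]
    have hwr : pvWindow (pvToBits (((r' : Nat) : Int)).toNat) (bits - 1)
        = pvD2BN (pvNV dm % pvNV vm) (bits - 1).toNat := by
      rw [Int.toNat_natCast, pvWindow_eq_pvWinN,
        pvWinN_eq_pvD2BN _ _ (pvToBits_spec r').2, (pvToBits_spec r').1, hrv]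
    rw [hwq, hwr]
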